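-- pv_equiv track=rewrite | github.com/pororodl/LeetCode | 1分钟写算法/upper_bound.py | last_min
-- ===== SOURCE A (Python) =====
-- def last_min(nums,target):
--     '''
--     :param nums:
--     :param target:
--     :return:返回最后一个小于target 的数字，如果不存在返回数组的长度 ===>第一个大于等于target的数字的下标-1
--     '''
--     low, high = 0, len(nums) - 1
--     while low <= high:
--         mid = low + (high - low) // 2
--         if nums[mid] >= target:
--             high = mid - 1
--         else:
--             low = mid + 1
--     if low==0:
--         return len(nums)
--     return low-1
-- ===== SOURCE B (Python) =====
-- def last_min(nums, target):
--     # Recursive divide-and-conquer on (lo, length) instead of an imperative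
--     # low/high while loop; probes the same midpoints, so it agrees with A
--     # even on unsorted input.
--     def go(lo, n):
--         if n == 0:
--             return lo
--         h = (n - 1) // 2
--         if nums[lo + h] >= target:
--             return go(lo, h)
--         return go(lo + h + 1, n // 2)
--
--     low = go(0, len(nums))
--     return len(nums) if low == 0 else low - 1
-- ===== Notes on version B (the rewrite author's own statement) =====
-- stated objective: alternative
-- what changed: The imperative low/high while loop is replaced by a recursive divide-and-conquer helper whose state is (lo, interval length), with the post-processing kept; it probes the same midpoints so results coincide even on unsorted input.
import Mathlib
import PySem

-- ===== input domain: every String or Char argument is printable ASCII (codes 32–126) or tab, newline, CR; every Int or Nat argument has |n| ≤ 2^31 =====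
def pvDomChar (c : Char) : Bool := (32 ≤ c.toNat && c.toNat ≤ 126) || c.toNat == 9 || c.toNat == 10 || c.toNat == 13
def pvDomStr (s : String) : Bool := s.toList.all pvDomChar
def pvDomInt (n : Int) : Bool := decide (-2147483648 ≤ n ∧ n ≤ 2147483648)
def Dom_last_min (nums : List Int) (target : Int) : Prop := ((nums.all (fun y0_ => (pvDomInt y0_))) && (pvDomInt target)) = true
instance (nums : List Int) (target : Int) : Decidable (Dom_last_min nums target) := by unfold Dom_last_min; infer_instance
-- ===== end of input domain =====

-- B replaces A's imperative low/high while loop by a recursive divide-and-conquer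
-- helper on (lo, interval length); same midpoints, so the same value everywhere.

-- ===== PORT A =====
-- the while loop of A, as tail recursion over the state (low, high)
def lastMinLoop (nums : List Int) (target : Int) (low high : Int) : Int :=
  if low ≤ high then
    let mid := low + PySem.Int.floordiv (high - low) 2
    match PySem.List.pyGet? nums mid with
    | none => low   -- unreachable for A's calls (mid stays in range); IndexError in Python
    | some v =>
      if v ≥ target then lastMinLoop nums target low (mid - 1)
      else lastMinLoop nums target (mid + 1) high
  else low
termination_by (high - low + 1).toNat
decreasing_by
  · have h2 := PySem.Int.floordiv_two_mid_bounds (lo := 0) (hi := high - low) (by omega)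
    simp only [zero_add] at h2; omega
  · have h2 := PySem.Int.floordiv_two_mid_bounds (lo := 0) (hi := high - low) (by omega)
    simp only [zero_add] at h2; omega

def last_min (nums : List Int) (target : Int) : Int :=
  let low := lastMinLoop nums target 0 ((nums.length : Int) - 1)
  if low = 0 then (nums.length : Int) else low - 1

-- ===== PORT B =====
-- B's recursive helper go(lo, n): n is the length of the remaining interval
def lastMinGo (nums : List Int) (target : Int) (lo : Int) (n : Nat) : Int :=
  if n = 0 then lo
  else
    let h := (n - 1) / 2
    match PySem.List.pyGet? nums (lo + (h : Int)) with
    | none => lo   -- unreachable for B's calls; IndexError in Python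
    | some v =>
      if v ≥ target then lastMinGo nums target lo h
      else lastMinGo nums target (lo + (h : Int) + 1) (n / 2)
termination_by n
decreasing_by all_goals omega

def last_min_alt (nums : List Int) (target : Int) : Int :=
  let low := lastMinGo nums target 0 nums.length
  if low = 0 then (nums.length : Int) else low - 1

-- ===== PRECONDITION & SPEC =====
def Spec_last_min (nums : List Int) (target : Int) (out : Int) : Prop := out = last_min_alt nums target
instance (nums : List Int) (target : Int) (out : Int) : Decidable (Spec_last_min nums target out) := by unfold Spec_last_min; infer_instance

-- ===== CLAIM (what is proved, stated in full; the proofs are below) =====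
def Claim_equal_last_min : Prop := ∀ (nums : List Int) (target : Int), Dom_last_min nums target → Spec_last_min nums target (last_min nums target)

-- ===== LEMMAS AND PROOFS =====
-- The loop over (low, high) equals the recursion over (low, n) when n = high - low + 1.
theorem lastMinLoop_eq_go (nums : List Int) (target : Int) :
    ∀ (n : Nat) (low high : Int), high + 1 = low + n →
      lastMinLoop nums target low high = lastMinGo nums target low n := by
  intro n
  induction n using Nat.strong_induction_on with
  | _ n ih =>
    intro low high hn
    rw [lastMinLoop, lastMinGo]
    rcases Nat.eq_zero_or_pos n with h0 | hpos
    · subst h0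
      have : ¬ low ≤ high := by omega
      simp [this]
    · have hle : low ≤ high := by omega
      have hcast : high - low = ((n - 1 : Nat) : Int) := by omega
      have hfd : PySem.Int.floordiv (high - low) 2 = (((n - 1) / 2 : Nat) : Int) := by
        rw [hcast]; exact_mod_cast PySem.Int.floordiv_natCast (n - 1) 2
      simp only [hle, if_pos, Nat.pos_iff_ne_zero.mp hpos, hfd]
      cases hget : PySem.List.pyGet? nums (low + (((n - 1) / 2 : Nat) : Int)) with
      | none => rfl
      | some v =>
        by_cases hv : v ≥ target
        · simp only [hv, if_pos]
          exact ih ((n - 1) / 2) (by omega) low (low + (((n - 1) / 2 : Nat) : Int) - 1) (by omega)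
        · simp only [hv, if_neg, not_false_iff]
          exact ih (n / 2) (by omega) (low + (((n - 1) / 2 : Nat) : Int) + 1) high (by omega)

-- ===== VERDICT (by name: the statement is the Claim_ definition above) =====
theorem last_min_spec : Claim_equal_last_min := by
  intro nums target _
  unfold Spec_last_min last_min last_min_alt
  rw [lastMinLoop_eq_go nums target nums.length 0 ((nums.length : Int) - 1) (by omega)]
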